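-- pv_equiv track=rewrite | github.com/JinJis93/coding_test | prob_4109/answer.py | create_tree_dict
-- ===== SOURCE A (Python) =====
-- def create_tree_dict(height_list: list):
--     tree_info_list = []
--
--     # make height ranked list
--     seq = sorted(height_list)
--     height_ranked_list = [seq.index(v) for v in height_list]
--
--     position_rank_count = 0
--     for height, height_rank in zip(height_list, height_ranked_list):
--         tree_info_list.append({
--             "hegith": height,
--             "height_rank": height_rank,
--             "position": position_rank_count,
--             "position_rank": position_rank_count,
--         })
--         position_rank_count += 1
--     return tree_info_list
-- ===== SOURCE B (Python) =====
-- def create_tree_dict(height_list: list):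
--     result = []
--     for i, height in enumerate(height_list):
--         rank = sum(1 for h in height_list if h < height)
--         result.append({
--             "hegith": height,
--             "height_rank": rank,
--             "position": i,
--             "position_rank": i,
--         })
--     return result
-- ===== Notes on version B (the rewrite author's own statement) =====
-- stated objective: simpler
-- what changed: Replaced the sort + repeated seq.index scan with a single enumerate loop that computes each rank by directly counting strictly smaller heights, and takes position from the loop index.
import Mathlib
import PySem

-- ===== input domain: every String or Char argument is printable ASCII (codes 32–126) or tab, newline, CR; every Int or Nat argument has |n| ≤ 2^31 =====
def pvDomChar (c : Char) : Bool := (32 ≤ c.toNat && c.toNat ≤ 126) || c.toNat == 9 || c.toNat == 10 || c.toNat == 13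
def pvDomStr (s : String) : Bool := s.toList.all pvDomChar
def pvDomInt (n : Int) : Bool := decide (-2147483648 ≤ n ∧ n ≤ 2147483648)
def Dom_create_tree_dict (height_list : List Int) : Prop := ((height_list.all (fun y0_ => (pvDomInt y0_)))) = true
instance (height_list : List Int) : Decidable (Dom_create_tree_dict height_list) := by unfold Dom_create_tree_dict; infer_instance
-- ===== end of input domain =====

-- B replaces A's sort + repeated seq.index scan by a single enumerate loop counting strictly
-- smaller heights (objective: simpler — no sort, no index scans).


-- one appended dict (fixed keys, insertion order)
def pvEntry (h r p : Int) : List (String × Int) :=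
  [("hegith", h), ("height_rank", r), ("position", p), ("position_rank", p)]

-- ===== PORT A =====
-- seq.index(v) is PySem.List.index?; v is always a member of seq, so the IndexError default 0 is unreachable
def create_tree_dict (height_list : List Int) : List (List (String × Int)) :=
  let seq := PySem.List.sorted height_list (fun x => x) false
  let height_ranked_list := height_list.map (fun v => (((PySem.List.index? seq v).getD 0 : Nat) : Int))
  ((height_list.zip height_ranked_list).foldl
    (fun (st : List (List (String × Int)) × Int) p =>
      (st.1 ++ [pvEntry p.1 p.2 st.2], st.2 + 1)) ([], 0)).1

-- ===== PORT B =====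
def create_tree_dict_alt (height_list : List Int) : List (List (String × Int)) :=
  (PySem.List.enumerate height_list 0).foldl
    (fun acc p =>
      acc ++ [pvEntry p.2 ((height_list.map (fun h => if h < p.2 then (1 : Int) else 0)).sum) p.1]) []

-- ===== PRECONDITION & SPEC =====
def Spec_create_tree_dict (height_list : List Int) (out : List (List (String × Int))) : Prop := out = create_tree_dict_alt height_list
instance (height_list : List Int) (out : List (List (String × Int))) : Decidable (Spec_create_tree_dict height_list out) := by unfold Spec_create_tree_dict; infer_instance

-- ===== CLAIM (what is proved, stated in full; the proofs are below) =====
def Claim_equal_create_tree_dict : Prop := ∀ (height_list : List Int), Dom_create_tree_dict height_list → Spec_create_tree_dict height_list (create_tree_dict height_list)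

-- ===== LEMMAS AND PROOFS =====

-- common recursive description of both loops: entries with ranks F and positions counted from c
def pvBuild (F : Int → Int) : List Int → Int → List (List (String × Int))
  | [], _ => []
  | v :: t, c => pvEntry v (F v) c :: pvBuild F t (c + 1)

lemma pvBuild_congr (F G : Int → Int) : ∀ (l : List Int) (c : Int),
    (∀ v ∈ l, F v = G v) → pvBuild F l c = pvBuild G l c := by
  intro l
  induction l with
  | nil => intro c _; rfl
  | cons v t ih =>
    intro c h
    simp only [pvBuild, h v (by simp), ih (c + 1) (fun x hx => h x (by simp [hx]))]

lemma foldA_eq (F : Int → Int) : ∀ (l : List Int) (acc : List (List (String × Int))) (c : Int),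
    ((l.zip (l.map F)).foldl
      (fun (st : List (List (String × Int)) × Int) p =>
        (st.1 ++ [pvEntry p.1 p.2 st.2], st.2 + 1)) (acc, c)).1 = acc ++ pvBuild F l c := by
  intro l
  induction l with
  | nil => intro acc c; simp [pvBuild]
  | cons v t ih =>
    intro acc c
    simp only [List.map, List.zip_cons_cons, List.foldl_cons, ih, pvBuild, List.append_assoc,
      List.singleton_append]

lemma foldB_eq (G : Int → Int) : ∀ (l : List Int) (acc : List (List (String × Int))) (c : Int),
    ((PySem.List.enumerate l c).foldl
      (fun acc p => acc ++ [pvEntry p.2 (G p.2) p.1]) acc) = acc ++ pvBuild G l c := by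
  intro l
  induction l with
  | nil => intro acc c; simp [PySem.List.enumerate_nil, pvBuild]
  | cons v t ih =>
    intro acc c
    simp only [PySem.List.enumerate_cons, List.foldl_cons, ih, pvBuild, List.append_assoc,
      List.singleton_append]

-- seq.index(v) on seq = sorted(xs) equals the number of elements of xs strictly below v
lemma index_sorted_eq_countP (xs : List Int) (v : Int) (hv : v ∈ xs) :
    PySem.List.index? (PySem.List.sorted xs (fun x => x) false) v
      = some (xs.countP (fun h => decide (h < v))) := by
  set s := PySem.List.sorted xs (fun x => x) false with hs
  have hmem : v ∈ s := by rw [hs, PySem.List.mem_sorted]; exact hv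
  have hsome : (PySem.List.index? s v).isSome := by
    rw [PySem.List.index?_isSome_iff]; exact hmem
  obtain ⟨k, hk⟩ := Option.isSome_iff_exists.mp hsome
  obtain ⟨pre, suf, hdecomp, hlen, hnot⟩ := (PySem.List.index?_eq_some_iff _ _ _).mp hk
  have hpair : s.Pairwise (fun a b => (fun x => x) a ≤ (fun x => x) b) :=
    PySem.List.sorted_pairwise xs (fun x => x)
  rw [hdecomp] at hpair
  have hperm : s.Perm xs := PySem.List.sorted_perm xs (fun x => x) false
  have hcount : s.countP (fun h => decide (h < v)) = xs.countP (fun h => decide (h < v)) :=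
    hperm.countP_eq _
  rw [hk]
  congr 1
  rw [← hcount, hdecomp, List.countP_append]
  have hpre : ∀ a ∈ pre, a < v := by
    intro a ha
    have hle : a ≤ v := by
      have := (List.pairwise_append.mp hpair).2.2 a ha v (by simp)
      simpa using this
    rcases lt_or_eq_of_le hle with h | h
    · exact h
    · exact absurd (h ▸ ha) hnot
  have h1 : pre.countP (fun h => decide (h < v)) = pre.length := by
    rw [List.countP_eq_length]
    intro a ha; simpa using hpre a ha
  have hsuf : ∀ b ∈ suf, v ≤ b := by
    intro b hb
    have := List.rel_of_pairwise_cons (List.pairwise_append.mp hpair).2.1 hb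
    simpa using this
  have h2 : (v :: suf).countP (fun h => decide (h < v)) = 0 := by
    rw [List.countP_eq_zero]
    intro b hb
    rcases List.mem_cons.mp hb with h | h
    · simp [h]
    · simp only [decide_eq_true_eq]; exact not_lt.mpr (hsuf b h)
  omega

lemma sum_ite_eq_countP (xs : List Int) (v : Int) :
    (xs.map (fun h => if h < v then (1 : Int) else 0)).sum = (xs.countP (fun h => decide (h < v)) : Int) := by
  induction xs with
  | nil => simp
  | cons a t ih =>
    by_cases h : a < v
    · simp [h, ih]; omega
    · simp [h, ih]

-- ===== VERDICT (by name: the statement is the Claim_ definition above) =====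
theorem create_tree_dict_spec : Claim_equal_create_tree_dict := by
  intro xs _
  unfold Spec_create_tree_dict create_tree_dict create_tree_dict_alt
  rw [foldA_eq, foldB_eq (fun v => (xs.map (fun h => if h < v then (1 : Int) else 0)).sum)]
  simp only [List.nil_append]
  apply pvBuild_congr
  intro v hv
  rw [index_sorted_eq_countP xs v hv, sum_ite_eq_countP]
  simp
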